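-- pv_equiv track=rewrite | github.com/arunraja-hub/APPuSSA | bilstm_lexical.py | preprocess_sentence
-- ===== SOURCE A (Python) =====
-- PUNCTUATION_MARKS = [
--   '<FULL_STOP>', '<COMMA>', '<QUESTION_MARK>', '<EXCLAMATION_MARK>', '<DOTS>'
-- ]
--
-- def preprocess_sentence(sentence):
--   output_words = []
--   output_punctuation_marks = []
--
--   id_ = sentence.split()[0]
--   words = sentence.split()[1:]
--   for (word, punctuation_mark) in zip(words, words[1:] + [None]):
--     if word in PUNCTUATION_MARKS:
--       continue
--
--     if punctuation_mark not in PUNCTUATION_MARKS: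
--       punctuation_mark = "<SPACE>"
--
--     output_words.append(word)
--     output_punctuation_marks.append(punctuation_mark)
--
--   return [id_,
--       " ".join(output_words),
--       " ".join(output_punctuation_marks)
--   ]
-- ===== SOURCE B (Python) =====
-- PUNCTUATION_MARKS = [
--   '<FULL_STOP>', '<COMMA>', '<QUESTION_MARK>', '<EXCLAMATION_MARK>', '<DOTS>'
-- ]
--
-- def preprocess_sentence(sentence):
--   tokens = sentence.split()
--   id_ = tokens[0]
--   output_words = []
--   output_punctuation_marks = []
--   pending = None
--   for token in tokens[1:]:
--     if token in PUNCTUATION_MARKS: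
--       if pending is not None:
--         output_words.append(pending)
--         output_punctuation_marks.append(token)
--         pending = None
--     else:
--       if pending is not None:
--         output_words.append(pending)
--         output_punctuation_marks.append("<SPACE>")
--       pending = token
--   if pending is not None:
--     output_words.append(pending)
--     output_punctuation_marks.append("<SPACE>")
--   return [id_,
--       " ".join(output_words),
--       " ".join(output_punctuation_marks)
--   ]
-- ===== Notes on version B (the rewrite author's own statement) =====
-- stated objective: alternative
-- what changed: Replaces the zip-with-lookahead pairing (and its second split() call) by a single forward pass over one split, maintaining a pending-word state that is flushed with '<SPACE>' or attached to a following punctuation mark.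
import Mathlib
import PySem

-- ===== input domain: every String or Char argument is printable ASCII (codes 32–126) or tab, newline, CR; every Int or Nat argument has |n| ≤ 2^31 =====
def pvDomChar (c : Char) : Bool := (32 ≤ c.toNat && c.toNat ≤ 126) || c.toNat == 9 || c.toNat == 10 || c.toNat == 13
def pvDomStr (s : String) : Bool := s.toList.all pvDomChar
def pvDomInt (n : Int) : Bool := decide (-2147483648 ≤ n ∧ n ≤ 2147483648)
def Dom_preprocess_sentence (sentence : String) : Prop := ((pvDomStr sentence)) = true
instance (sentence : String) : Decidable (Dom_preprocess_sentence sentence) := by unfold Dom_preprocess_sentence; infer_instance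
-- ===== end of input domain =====

-- B replaces A's zip-with-lookahead pairing (and second split()) by one forward pass with a
-- pending-word state flushed with "<SPACE>" or attached to a following punctuation mark;
-- objective: alternative decomposition, same O(n) cost.

-- ===== PORT A =====
def pvPUNCTUATION_MARKS : List String :=
  ["<FULL_STOP>", "<COMMA>", "<QUESTION_MARK>", "<EXCLAMATION_MARK>", "<DOTS>"]

-- one iteration of A's loop over zip(words, words[1:] + [None])
def pvAStep (acc : List String × List String) (p : String × Option String) :
    List String × List String :=
  if pvPUNCTUATION_MARKS.contains p.1 then acc
  else
    let mark := match p.2 with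
      | some m => if pvPUNCTUATION_MARKS.contains m then m else "<SPACE>"
      | none => "<SPACE>"
    (acc.1 ++ [p.1], acc.2 ++ [mark])

def preprocess_sentence (sentence : String) : List String :=
  match PySem.List.pyGet? (PySem.Str.split₀ sentence) 0 with
  | none => []  -- IndexError on empty split; excluded by Pre_
  | some id_ =>
    let words := PySem.List.slice (PySem.Str.split₀ sentence) (some 1) none
    let pairs := words.zip ((PySem.List.slice words (some 1) none).map some ++ [none])
    let res := pairs.foldl pvAStep ([], [])
    [id_, PySem.Str.join " " res.1, PySem.Str.join " " res.2]

-- ===== PORT B =====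
-- one iteration of B's loop: state = (pending, output_words, output_punctuation_marks)
def pvBStep (st : Option String × List String × List String) (token : String) :
    Option String × List String × List String :=
  if pvPUNCTUATION_MARKS.contains token then
    match st.1 with
    | some w => (none, st.2.1 ++ [w], st.2.2 ++ [token])
    | none => st
  else
    match st.1 with
    | some w => (some token, st.2.1 ++ [w], st.2.2 ++ ["<SPACE>"])
    | none => (some token, st.2.1, st.2.2)

-- B's final flush of the pending word
def pvFlush (st : Option String × List String × List String) : List String × List String :=
  match st.1 with
  | some w => (st.2.1 ++ [w], st.2.2 ++ ["<SPACE>"])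
  | none => st.2

def preprocess_sentence_alt (sentence : String) : List String :=
  let tokens := PySem.Str.split₀ sentence
  match PySem.List.pyGet? tokens 0 with
  | none => []  -- IndexError on empty split; excluded by Pre_
  | some id_ =>
    let st := (PySem.List.slice tokens (some 1) none).foldl pvBStep (none, [], [])
    let res := pvFlush st
    [id_, PySem.Str.join " " res.1, PySem.Str.join " " res.2]

-- ===== PRECONDITION & SPEC =====
-- Pre_ excludes exactly the whitespace-only sentences, on which A (and B) raise IndexError at split()[0].
def Pre_preprocess_sentence (sentence : String) : Prop := PySem.Str.split₀ sentence ≠ []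
instance (sentence : String) : Decidable (Pre_preprocess_sentence sentence) := by
  unfold Pre_preprocess_sentence; infer_instance
def pvWitness_preprocess_sentence : String := "17 hello <COMMA> world <FULL_STOP>"

def Spec_preprocess_sentence (sentence : String) (out : List String) : Prop := out = preprocess_sentence_alt sentence
instance (sentence : String) (out : List String) : Decidable (Spec_preprocess_sentence sentence out) := by unfold Spec_preprocess_sentence; infer_instance

-- ===== CLAIM (what is proved, stated in full; the proofs are below) =====
def Claim_equal_preprocess_sentence : Prop := ∀ (sentence : String), Dom_preprocess_sentence sentence → Pre_preprocess_sentence sentence → Spec_preprocess_sentence sentence (preprocess_sentence sentence)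

-- ===== LEMMAS AND PROOFS =====

-- the virtual token stream B still has to account for: the pending word (if any) followed by ts
def pvPref (p : Option String) (ts : List String) : List String :=
  match p with
  | some w => w :: ts
  | none => ts

-- A's pair list for a token list
def pvPairs (ts : List String) : List (String × Option String) :=
  ts.zip ((ts.drop 1).map some ++ [none])

lemma pvSlice_one {α : Type} (xs : List α) :
    PySem.List.slice xs (some 1) none = xs.drop 1 := by
  simpa using PySem.List.slice_from_natCast (a := 1) (xs := xs)

lemma pvPairs_cons (t : String) (rest : List String) :
    pvPairs (t :: rest) =
      (t, rest.head?) :: pvPairs rest := by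
  cases rest <;> simp [pvPairs]

-- main loop correspondence: B's pass with pending p over ts, then the final flush,
-- equals A's fold over the lookahead pairs of (pending followed by ts)
lemma pvKey (ts : List String) : ∀ (ws ms : List String) (p : Option String),
    (∀ w, p = some w → w ∉ pvPUNCTUATION_MARKS) →
    pvFlush (ts.foldl pvBStep (p, ws, ms)) = (pvPairs (pvPref p ts)).foldl pvAStep (ws, ms) := by
  induction ts with
  | nil =>
    intro ws ms p hp
    cases p with
    | none => simp [pvPref, pvPairs, pvFlush]
    | some w => simp [pvPref, pvPairs, pvFlush, pvAStep, hp w rfl]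
  | cons t rest ih =>
    intro ws ms p hp
    by_cases ht : t ∈ pvPUNCTUATION_MARKS
    · have htc : pvPUNCTUATION_MARKS.contains t = true := by simpa using ht
      cases p with
      | none =>
        simp only [pvPref, List.foldl_cons, pvBStep, htc, if_pos, pvPairs_cons]
        rw [ih ws ms none (by intro w h; cases h)]
        cases rest with
        | nil => simp [pvPairs, pvPref, pvAStep, ht]
        | cons r rs => simp [pvPref, pvPairs_cons, pvAStep, ht]
      | some w =>
        have hw := hp w rfl
        simp only [pvPref, List.foldl_cons, pvBStep, htc, if_pos]
        rw [ih (ws ++ [w]) (ms ++ [t]) none (by intro u h; cases h)]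
        rw [pvPairs_cons, pvPairs_cons]
        simp only [List.foldl_cons]
        have h1 : pvAStep (ws, ms) (w, (t :: rest).head?) = (ws ++ [w], ms ++ [t]) := by
          simp [pvAStep, hw, ht]
        rw [h1]
        cases rest with
        | nil => simp [pvPairs, pvAStep, ht, pvPref]
        | cons r rs => simp [pvPref, pvPairs_cons, pvAStep, ht]
    · have htc : pvPUNCTUATION_MARKS.contains t = false := by simpa using ht
      cases p with
      | none =>
        simp only [pvPref, List.foldl_cons, pvBStep, htc, Bool.false_eq_true, if_neg,
          not_false_eq_true]
        rw [ih ws ms (some t) (by intro u h; cases h; exact ht)]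
        rfl
      | some w =>
        have hw := hp w rfl
        simp only [pvPref, List.foldl_cons, pvBStep, htc, Bool.false_eq_true, if_neg,
          not_false_eq_true]
        rw [ih (ws ++ [w]) (ms ++ ["<SPACE>"]) (some t) (by intro u h; cases h; exact ht)]
        rw [pvPairs_cons]
        simp only [List.foldl_cons, pvPref]
        have h1 : pvAStep (ws, ms) (w, (t :: rest).head?) = (ws ++ [w], ms ++ ["<SPACE>"]) := by
          simp [pvAStep, hw, ht]
        rw [h1]

-- ===== VERDICT (by name: the statement is the Claim_ definition above) =====
theorem preprocess_sentence_spec : Claim_equal_preprocess_sentence := by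
  intro sentence _ hpre
  unfold Spec_preprocess_sentence preprocess_sentence preprocess_sentence_alt
  obtain ⟨t, rest, hts⟩ : ∃ t rest, PySem.Str.split₀ sentence = t :: rest := by
    cases h : PySem.Str.split₀ sentence with
    | nil => exact absurd h hpre
    | cons a as => exact ⟨a, as, rfl⟩
  rw [hts]
  simp only [PySem.List.pyGet?_zero_cons, pvSlice_one, List.drop_one, List.tail_cons]
  have := pvKey rest [] [] none (by intro w h; cases h)
  simp only [pvPref] at this
  rw [this]
  simp [pvPairs]
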